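-- pv_equiv track=rewrite | github.com/MarkMaMed/IMU-Surgical-Intention-Perception | eval/plot_intent_transition_graph.py | _build_transitions
-- ===== SOURCE A (Python) =====
-- from collections import Counter
--
-- def _build_transitions(labels: list[str]) -> Counter[tuple[str, str]]:
--     c: Counter[tuple[str, str]] = Counter()
--     if not labels:
--         return c
--     prev = labels[0]
--     for cur in labels[1:]:
--         if cur != prev:
--             c[(prev, cur)] += 1
--         prev = cur
--     return c
-- ===== SOURCE B (Python) =====
-- from collections import Counter
-- from itertools import groupby
--
-- def _build_transitions(labels: list[str]) -> Counter[tuple[str, str]]: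
--     runs = [k for k, _ in groupby(labels)]
--     return Counter(zip(runs, runs[1:]))
-- ===== Notes on version B (the rewrite author's own statement) =====
-- stated objective: idiomatic
-- what changed: B first collapses the label sequence into its maximal-run keys with itertools.groupby and then counts all adjacent run pairs with Counter(zip(runs, runs[1:])), removing A's explicit prev-tracking loop and inequality test.
import Mathlib
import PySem

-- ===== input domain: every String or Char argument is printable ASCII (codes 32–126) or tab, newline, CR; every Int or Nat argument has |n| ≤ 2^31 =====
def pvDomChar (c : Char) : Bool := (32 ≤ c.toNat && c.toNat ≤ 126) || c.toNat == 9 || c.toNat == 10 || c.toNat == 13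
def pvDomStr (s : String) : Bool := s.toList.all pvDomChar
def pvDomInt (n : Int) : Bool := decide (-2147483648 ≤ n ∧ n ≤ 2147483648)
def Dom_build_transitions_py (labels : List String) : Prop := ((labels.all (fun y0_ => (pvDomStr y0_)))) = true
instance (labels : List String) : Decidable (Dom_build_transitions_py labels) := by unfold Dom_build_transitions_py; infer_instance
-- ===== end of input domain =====

-- B replaces A's prev-tracking loop with run-compression (groupby keys) followed by counting
-- all adjacent run pairs; same O(n) cost, no inequality test in the counting pass (objective: idiomatic).

-- Counter increment c[k] += 1: bump in place if the key exists, else append (k, 1).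
-- Shared helper: both Pythons increment a Counter entry exactly this way.
def counterInc (d : List ((String × String) × Int)) (k : String × String) :
    List ((String × String) × Int) :=
  match d with
  | [] => [(k, 1)]
  | (k', v) :: t => if k' = k then (k', v + 1) :: t else (k', v) :: counterInc t k

-- dict[(str,str), int] rendered as the required flat triple list
def counterOut (d : List ((String × String) × Int)) : List (String × String × Int) :=
  d.map (fun kv => (kv.1.1, kv.1.2, kv.2))

-- ===== PORT A =====
-- literal transliteration: prev/cur loop over labels[1:], incrementing on cur ≠ prev
def build_transitions_py (labels : List String) : List (String × String × Int) :=
  match labels with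
  | [] => counterOut []
  | p :: rest =>
    let st := rest.foldl
      (fun (st : List ((String × String) × Int) × String) cur =>
        if cur ≠ st.2 then (counterInc st.1 (st.2, cur), cur) else (st.1, cur))
      ([], p)
    counterOut st.1

-- ===== PORT B =====
-- [k for k, _ in groupby(labels)]: the sequence of maximal-run keys
def runKeysAux (p : String) (l : List String) : List String :=
  match l with
  | [] => []
  | c :: r => if c ≠ p then c :: runKeysAux c r else runKeysAux p r

def runKeys (l : List String) : List String :=
  match l with
  | [] => []
  | p :: rest => p :: runKeysAux p rest

-- Counter(zip(runs, runs[1:]))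
def build_transitions_py_alt (labels : List String) : List (String × String × Int) :=
  let runs := runKeys labels
  counterOut ((List.zip runs (runs.drop 1)).foldl counterInc [])

-- ===== PRECONDITION & SPEC =====
def Spec_build_transitions_py (labels : List String) (out : List (String × String × Int)) : Prop := out = build_transitions_py_alt labels
instance (labels : List String) (out : List (String × String × Int)) : Decidable (Spec_build_transitions_py labels out) := by unfold Spec_build_transitions_py; infer_instance

-- ===== CLAIM (what is proved, stated in full; the proofs are below) =====
def Claim_equal_build_transitions_py : Prop := ∀ (labels : List String), Dom_build_transitions_py labels → Spec_build_transitions_py labels (build_transitions_py labels)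

-- ===== LEMMAS AND PROOFS =====

-- The ordered list of transition pairs (prev, cur) with cur ≠ prev, starting from prev = p.
def pairsNe (p : String) (l : List String) : List (String × String) :=
  match l with
  | [] => []
  | c :: r => if c ≠ p then (p, c) :: pairsNe c r else pairsNe p r

-- A's fold computes exactly the counter over pairsNe.
theorem foldA_eq (l : List String) : ∀ (p : String) (d : List ((String × String) × Int)),
    (l.foldl
      (fun (st : List ((String × String) × Int) × String) cur =>
        if cur ≠ st.2 then (counterInc st.1 (st.2, cur), cur) else (st.1, cur))
      (d, p)).1 = (pairsNe p l).foldl counterInc d := by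
  induction l with
  | nil => intro p d; simp [pairsNe]
  | cons c r ih =>
    intro p d
    by_cases h : c = p
    · subst h
      simpa [pairsNe] using ih c d
    · simpa [pairsNe, h] using ih c (counterInc d (p, c))

-- Adjacent pairs of the run-key sequence are exactly the transition pairs.
theorem zip_runKeysAux (l : List String) : ∀ (p : String),
    List.zip (p :: runKeysAux p l) (runKeysAux p l) = pairsNe p l := by
  induction l with
  | nil => intro p; simp [runKeysAux, pairsNe]
  | cons c r ih =>
    intro p
    by_cases h : c = p
    · simp [runKeysAux, pairsNe, h, ih]
    · simpa [runKeysAux, pairsNe, h, List.zip] using ih c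

-- ===== VERDICT (by name: the statement is the Claim_ definition above) =====
theorem build_transitions_py_spec : Claim_equal_build_transitions_py := by
  intro labels _
  unfold Spec_build_transitions_py build_transitions_py build_transitions_py_alt
  cases labels with
  | nil => simp [runKeys]
  | cons p rest =>
    simp only [runKeys, List.drop_one, List.tail_cons]
    rw [foldA_eq, ← zip_runKeysAux]
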